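-- pv_equiv track=rewrite | github.com/Contykpo/introduction-to-programming | Guia 8/Ejercicio1.py | vocales_distintas_en_palabra
-- ===== SOURCE A (Python) =====
-- def vocales_distintas_en_palabra(palabra: str) -> bool:
--     listaDeVocales = ["a","A","e","E","i","I","o","O","u","U"]
--     diferencia: int = 0
--     for caracter in palabra:
--         if caracter in listaDeVocales:
--             listaDeVocales.remove(caracter.lower())
--             listaDeVocales.remove(caracter.upper())
--             diferencia += 1
--     return diferencia >= 3
-- ===== SOURCE B (Python) =====
-- def vocales_distintas_en_palabra(palabra: str) -> bool:
--     # Scan the five vowels instead of the word's characters: a vowel counts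
--     # if it occurs in the word in either case.
--     return sum(1 for v in "aeiou" if v in palabra or v.upper() in palabra) >= 3
-- ===== Notes on version B (the rewrite author's own statement) =====
-- stated objective: simpler
-- what changed: B scans the five vowels once, testing each (either case) for substring membership in the word and comparing the count to 3, instead of A's per-character loop that mutates a shrinking candidate list (double remove) while incrementing a counter; the membership tests run in C, so B is also measurably faster by a constant factor.
import Mathlib
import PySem

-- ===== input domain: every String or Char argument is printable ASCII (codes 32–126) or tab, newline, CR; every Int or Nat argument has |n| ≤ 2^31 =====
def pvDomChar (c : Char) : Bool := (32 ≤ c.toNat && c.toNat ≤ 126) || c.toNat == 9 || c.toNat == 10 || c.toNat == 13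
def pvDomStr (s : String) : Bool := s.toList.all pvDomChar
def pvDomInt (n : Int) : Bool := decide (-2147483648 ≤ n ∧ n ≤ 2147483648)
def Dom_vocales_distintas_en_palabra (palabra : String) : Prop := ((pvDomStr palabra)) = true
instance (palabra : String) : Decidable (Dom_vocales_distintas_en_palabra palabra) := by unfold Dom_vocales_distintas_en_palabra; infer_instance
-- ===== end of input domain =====

-- B replaces A's shrinking candidate list + in-loop counter by a scan over the five
-- vowels with substring tests, decided by one final count comparison (objective: simpler).

-- ===== PORT A =====
-- loop body of A: if caracter in listaDeVocales: remove lower, remove upper, diferencia += 1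
-- (the `none` branch of remove? is Python's ValueError, unreachable here: after the
--  membership test both case variants are still present, since they are only removed in pairs)
def pvStepA (s : List (List Char) × Int) (c : Char) : List (List Char) × Int :=
  if s.1.contains [c] then
    let l1 := (PySem.List.remove? s.1 (PySem.Chars.lower [c])).getD s.1
    let l2 := (PySem.List.remove? l1 (PySem.Chars.upper [c])).getD l1
    (l2, s.2 + 1)
  else s

def vocales_distintas_en_palabra (palabra : String) : Bool :=
  let r := palabra.toList.foldl pvStepA
    ([['a'],['A'],['e'],['E'],['i'],['I'],['o'],['O'],['u'],['U']], (0 : Int))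
  decide (3 ≤ r.2)

-- ===== PORT B =====
def vocales_distintas_en_palabra_alt (palabra : String) : Bool :=
  decide (3 ≤ (("aeiou".toList.countP (fun v =>
    PySem.Str.isIn (String.ofList [v]) palabra ||
    PySem.Str.isIn (PySem.Str.upper (String.ofList [v])) palabra) : Nat) : Int))

-- ===== PRECONDITION & SPEC =====
def Spec_vocales_distintas_en_palabra (palabra : String) (out : Bool) : Prop := out = vocales_distintas_en_palabra_alt palabra
instance (palabra : String) (out : Bool) : Decidable (Spec_vocales_distintas_en_palabra palabra out) := by unfold Spec_vocales_distintas_en_palabra; infer_instance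

-- ===== CLAIM (what is proved, stated in full; the proofs are below) =====
def Claim_equal_vocales_distintas_en_palabra : Prop := ∀ (palabra : String), Dom_vocales_distintas_en_palabra palabra → Spec_vocales_distintas_en_palabra palabra (vocales_distintas_en_palabra palabra)

-- ===== LEMMAS AND PROOFS =====

-- abstraction of A's loop state: which of the five vowels have been counted
def pvLV (b : Bool) (l u : Char) : List (List Char) := if b then [] else [[l], [u]]
def pvMkL (a e i o u : Bool) : List (List Char) :=
  pvLV a 'a' 'A' ++ pvLV e 'e' 'E' ++ pvLV i 'i' 'I' ++ pvLV o 'o' 'O' ++ pvLV u 'u' 'U'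
def pvIcnt (b : Bool) : Int := if b then 1 else 0
def pvHas (cs : List Char) (l u : Char) : Bool := cs.contains l || cs.contains u

lemma pvStepA_char (c : Char) (a e i o u : Bool) (n : Int) :
    pvStepA (pvMkL a e i o u, n) c =
      (pvMkL (a || ('a' == c || 'A' == c)) (e || ('e' == c || 'E' == c))
             (i || ('i' == c || 'I' == c)) (o || ('o' == c || 'O' == c))
             (u || ('u' == c || 'U' == c)),
       n + (pvIcnt (a || ('a' == c || 'A' == c)) - pvIcnt a)
         + (pvIcnt (e || ('e' == c || 'E' == c)) - pvIcnt e)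
         + (pvIcnt (i || ('i' == c || 'I' == c)) - pvIcnt i)
         + (pvIcnt (o || ('o' == c || 'O' == c)) - pvIcnt o)
         + (pvIcnt (u || ('u' == c || 'U' == c)) - pvIcnt u)) := by
  by_cases hc : c = 'a' ∨ c = 'A' ∨ c = 'e' ∨ c = 'E' ∨ c = 'i' ∨ c = 'I' ∨ c = 'o' ∨ c = 'O' ∨ c = 'u' ∨ c = 'U'
  · rcases hc with rfl|rfl|rfl|rfl|rfl|rfl|rfl|rfl|rfl|rfl <;>
      cases a <;> cases e <;> cases i <;> cases o <;> cases u <;>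
      simp [pvStepA, pvMkL, pvLV, pvIcnt] <;> decide
  · push Not at hc
    obtain ⟨h1, h2, h3, h4, h5, h6, h7, h8, h9, h10⟩ := hc
    have hmem : [c] ∉ pvMkL a e i o u := by
      cases a <;> cases e <;> cases i <;> cases o <;> cases u <;>
        simp [pvMkL, pvLV, h1, h2, h3, h4, h5, h6, h7, h8, h9, h10]
    have e1 : ('a' == c) = false := beq_eq_false_iff_ne.mpr (Ne.symm h1)
    have e2 : ('A' == c) = false := beq_eq_false_iff_ne.mpr (Ne.symm h2)
    have e3 : ('e' == c) = false := beq_eq_false_iff_ne.mpr (Ne.symm h3)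
    have e4 : ('E' == c) = false := beq_eq_false_iff_ne.mpr (Ne.symm h4)
    have e5 : ('i' == c) = false := beq_eq_false_iff_ne.mpr (Ne.symm h5)
    have e6 : ('I' == c) = false := beq_eq_false_iff_ne.mpr (Ne.symm h6)
    have e7 : ('o' == c) = false := beq_eq_false_iff_ne.mpr (Ne.symm h7)
    have e8 : ('O' == c) = false := beq_eq_false_iff_ne.mpr (Ne.symm h8)
    have e9 : ('u' == c) = false := beq_eq_false_iff_ne.mpr (Ne.symm h9)
    have e10 : ('U' == c) = false := beq_eq_false_iff_ne.mpr (Ne.symm h10)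
    simp [pvStepA, hmem, e1, e2, e3, e4, e5, e6, e7, e8, e9, e10]

lemma pvLoop (cs : List Char) (a e i o u : Bool) (n : Int) :
    cs.foldl pvStepA (pvMkL a e i o u, n) =
      (pvMkL (a || pvHas cs 'a' 'A') (e || pvHas cs 'e' 'E') (i || pvHas cs 'i' 'I')
             (o || pvHas cs 'o' 'O') (u || pvHas cs 'u' 'U'),
       n + (pvIcnt (a || pvHas cs 'a' 'A') - pvIcnt a)
         + (pvIcnt (e || pvHas cs 'e' 'E') - pvIcnt e)
         + (pvIcnt (i || pvHas cs 'i' 'I') - pvIcnt i)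
         + (pvIcnt (o || pvHas cs 'o' 'O') - pvIcnt o)
         + (pvIcnt (u || pvHas cs 'u' 'U') - pvIcnt u)) := by
  induction cs generalizing a e i o u n with
  | nil => simp [pvHas]
  | cons c cs ih =>
    rw [List.foldl_cons, pvStepA_char, ih]
    have hor : ∀ p q r s2 t : Bool,
        ((p || (q || r)) || (s2 || t)) = (p || ((q || s2) || (r || t))) := by decide
    have hA : ((a || ('a' == c || 'A' == c)) || pvHas cs 'a' 'A') = (a || pvHas (c :: cs) 'a' 'A') := by
      simp only [pvHas, List.contains_cons]; exact hor ..
    have hE : ((e || ('e' == c || 'E' == c)) || pvHas cs 'e' 'E') = (e || pvHas (c :: cs) 'e' 'E') := by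
      simp only [pvHas, List.contains_cons]; exact hor ..
    have hI : ((i || ('i' == c || 'I' == c)) || pvHas cs 'i' 'I') = (i || pvHas (c :: cs) 'i' 'I') := by
      simp only [pvHas, List.contains_cons]; exact hor ..
    have hO : ((o || ('o' == c || 'O' == c)) || pvHas cs 'o' 'O') = (o || pvHas (c :: cs) 'o' 'O') := by
      simp only [pvHas, List.contains_cons]; exact hor ..
    have hU : ((u || ('u' == c || 'U' == c)) || pvHas cs 'u' 'U') = (u || pvHas (c :: cs) 'u' 'U') := by
      simp only [pvHas, List.contains_cons]; exact hor ..
    rw [hA, hE, hI, hO, hU]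
    refine congrArg (Prod.mk _) ?_
    ring

lemma pvIsIn_singleton (c : Char) (s : String) :
    PySem.Str.isIn (String.ofList [c]) s = s.toList.contains c := by
  rw [Bool.eq_iff_iff, PySem.Str.isIn_iff_infix, List.contains_iff_mem]
  constructor
  · intro h
    have := h.subset (l₁ := (String.ofList [c]).toList)
    exact this (by simp)
  · intro h
    obtain ⟨s1, t1, heq⟩ := List.append_of_mem h
    exact ⟨s1, t1, by simp [heq]⟩

-- ===== VERDICT (by name: the statement is the Claim_ definition above) =====
theorem vocales_distintas_en_palabra_spec : Claim_equal_vocales_distintas_en_palabra := by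
  intro palabra _
  unfold Spec_vocales_distintas_en_palabra vocales_distintas_en_palabra vocales_distintas_en_palabra_alt
  have h0 : ([['a'],['A'],['e'],['E'],['i'],['I'],['o'],['O'],['u'],['U']] : List (List Char))
      = pvMkL false false false false false := by decide
  rw [h0, pvLoop]
  have hl : "aeiou".toList = ['a', 'e', 'i', 'o', 'u'] := by decide
  rw [hl]
  have u1 : PySem.Str.upper (String.ofList ['a']) = String.ofList ['A'] := by decide
  have u2 : PySem.Str.upper (String.ofList ['e']) = String.ofList ['E'] := by decide
  have u3 : PySem.Str.upper (String.ofList ['i']) = String.ofList ['I'] := by decide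
  have u4 : PySem.Str.upper (String.ofList ['o']) = String.ofList ['O'] := by decide
  have u5 : PySem.Str.upper (String.ofList ['u']) = String.ofList ['U'] := by decide
  simp only [List.countP_cons, List.countP_nil, u1, u2, u3, u4, u5, pvIsIn_singleton,
    pvHas, pvIcnt, Bool.false_or]
  generalize palabra.toList.contains 'a' = b1
  generalize palabra.toList.contains 'A' = b2
  generalize palabra.toList.contains 'e' = b3
  generalize palabra.toList.contains 'E' = b4
  generalize palabra.toList.contains 'i' = b5
  generalize palabra.toList.contains 'I' = b6
  generalize palabra.toList.contains 'o' = b7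
  generalize palabra.toList.contains 'O' = b8
  generalize palabra.toList.contains 'u' = b9
  generalize palabra.toList.contains 'U' = b10
  revert b1 b2 b3 b4 b5 b6 b7 b8 b9 b10
  decide
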